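-- pv_equiv track=rewrite | github.com/TomJKono/C_neoformans_Association | Scripts/Compile_GWAS_Results_GOI.py | merge_gwas_res
-- ===== SOURCE A (Python) =====
-- def merge_gwas_res(g1, g2, snplist):
--     """Merge two GWAS results dictionaries into a single one. We will "flip"
--     the key to SNP ID, rather than trait name."""
--     # Make a dictionary to hold the results
--     comb_res = {s:{} for s in snplist}
--     # Push the first dictionary results into the combined dict
--     for trait in g1:
--         for snp in snplist:
--             # Get the P-value and regression beta. If we cannot find the SNP
--             # in the association results, it was filtered for some reason, and
--             # we will drop in NA values.
--             pval, beta = g1[trait].get(snp, ('NA', 'NA'))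
--             comb_res[snp].update({trait: (pval, beta)})
--     # Push th esecond dictionary into the combined dict
--     for trait in g2:
--         for snp in snplist:
--             pval, beta = g2[trait].get(snp, ('NA', 'NA'))
--             comb_res[snp].update({trait: (pval, beta)})
--     return comb_res
-- ===== SOURCE B (Python) =====
-- def merge_gwas_res(g1, g2, snplist):
--     """Merge two GWAS results dictionaries, flipping the key to SNP ID.
--
--     Scatter strategy: pre-fill every SNP row with NA for every trait, then
--     walk each trait's association entries once and overwrite the hits."""
--     # Trait column order: g1's traits first, then g2-only traits; on a shared
--     # trait g2's results win (it is written last in the original).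
--     traits = list(g1) + [t for t in g2 if t not in g1]
--     rows = {s: dict.fromkeys(traits, ('NA', 'NA')) for s in snplist}
--     for t in traits:
--         assoc = g2[t] if t in g2 else g1[t]
--         for snp, val in assoc.items():
--             if snp in rows:
--                 pval, beta = val
--                 rows[snp][t] = (pval, beta)
--     return rows
-- ===== Notes on version B (the rewrite author's own statement) =====
-- stated objective: alternative
-- what changed: B replaces A's per-cell gather (two trait-major passes that look up every (trait, snp) cell with .get and a default) by a scatter: it computes the trait column order once, pre-fills every SNP row with NA for all traits, and then walks each trait's association entries once, overwriting only the SNPs actually present (guarded by membership in the row table).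
import Mathlib
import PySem

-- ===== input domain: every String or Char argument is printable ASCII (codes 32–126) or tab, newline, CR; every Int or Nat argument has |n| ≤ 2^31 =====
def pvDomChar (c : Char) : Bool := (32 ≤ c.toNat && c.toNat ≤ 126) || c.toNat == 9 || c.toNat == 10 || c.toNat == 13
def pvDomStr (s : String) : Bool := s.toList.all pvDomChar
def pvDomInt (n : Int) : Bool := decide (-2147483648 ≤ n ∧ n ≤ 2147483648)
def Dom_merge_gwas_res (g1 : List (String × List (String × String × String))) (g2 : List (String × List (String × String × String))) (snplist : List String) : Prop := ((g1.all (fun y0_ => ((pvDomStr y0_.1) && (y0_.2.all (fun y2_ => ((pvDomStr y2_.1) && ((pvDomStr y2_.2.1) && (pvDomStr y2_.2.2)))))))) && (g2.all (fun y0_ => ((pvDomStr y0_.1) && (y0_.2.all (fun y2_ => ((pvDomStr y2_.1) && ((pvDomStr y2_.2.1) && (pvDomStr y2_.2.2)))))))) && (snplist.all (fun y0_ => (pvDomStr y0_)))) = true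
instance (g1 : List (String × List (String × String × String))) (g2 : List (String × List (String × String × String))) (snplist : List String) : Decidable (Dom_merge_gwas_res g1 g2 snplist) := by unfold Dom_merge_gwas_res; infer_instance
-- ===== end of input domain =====

-- B replaces A's per-cell gather (two trait-major passes looking up every (trait, snp) cell with
-- .get and an NA default) by a scatter: compute the trait column order once, pre-fill every SNP
-- row with NA, then walk each trait's association entries and overwrite the hits (objective: alternative).


-- ===== PORT A =====
-- comb_res = {s:{} for s in snplist}; then two trait-major passes pushing g1, then g2, into it.
-- `pval, beta = ….get(snp, ('NA','NA')); … (pval, beta)` is the identity on the fetched pair,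
-- so the fetched pair is inserted directly.
def merge_gwas_res (g1 : List (String × List (String × String × String))) (g2 : List (String × List (String × String × String))) (snplist : List String) : List (String × List (String × String × String)) :=
  let comb0 : PySem.Dict String (PySem.Dict String (String × String)) :=
    snplist.foldl (fun d s => d.insert s PySem.Dict.empty) PySem.Dict.empty
  let comb1 := g1.foldl (fun comb p =>
    snplist.foldl (fun comb snp =>
      comb.modify snp PySem.Dict.empty (fun row =>
        row.insert p.1 ((PySem.Dict.mk ((PySem.Dict.mk g1).getD p.1 [])).getD snp ("NA", "NA")))) comb) comb0
  let comb2 := g2.foldl (fun comb p =>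
    snplist.foldl (fun comb snp =>
      comb.modify snp PySem.Dict.empty (fun row =>
        row.insert p.1 ((PySem.Dict.mk ((PySem.Dict.mk g2).getD p.1 [])).getD snp ("NA", "NA")))) comb) comb1
  comb2.items.map (fun p => (p.1, p.2.items))

-- ===== PORT B =====
-- traits = list(g1) + [t for t in g2 if t not in g1]; rows pre-filled with NA for every trait
-- (dict.fromkeys), then one scatter pass per trait over its association entries, writing only
-- SNPs present in the row table.
def merge_gwas_res_alt (g1 : List (String × List (String × String × String))) (g2 : List (String × List (String × String × String))) (snplist : List String) : List (String × List (String × String × String)) :=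
  let traits := (PySem.Dict.mk g1).keys ++
    ((PySem.Dict.mk g2).keys.filter (fun t => !((PySem.Dict.mk g1).contains t)))
  let naRow : PySem.Dict String (String × String) :=
    traits.foldl (fun r t => r.insert t ("NA", "NA")) PySem.Dict.empty
  let rows0 : PySem.Dict String (PySem.Dict String (String × String)) :=
    snplist.foldl (fun d s => d.insert s naRow) PySem.Dict.empty
  let rows := traits.foldl (fun rows t =>
    (if (PySem.Dict.mk g2).contains t then (PySem.Dict.mk g2).getD t []
     else (PySem.Dict.mk g1).getD t []).foldl
      (fun rows p =>
        if rows.contains p.1 then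
          rows.modify p.1 PySem.Dict.empty (fun row => row.insert t p.2)
        else rows) rows) rows0
  rows.items.map (fun p => (p.1, p.2.items))

-- ===== PRECONDITION & SPEC =====
-- Pre_ requires the outer association lists g1, g2 and every inner association list to have
-- pairwise-distinct keys: all of them model Python dicts (which cannot hold duplicate keys),
-- so duplicate-key lists correspond to no Python input.
def Pre_merge_gwas_res (g1 : List (String × List (String × String × String))) (g2 : List (String × List (String × String × String))) (snplist : List String) : Prop :=
  ((g1.map Prod.fst).Nodup ∧ ∀ p ∈ g1, (p.2.map Prod.fst).Nodup) ∧
  ((g2.map Prod.fst).Nodup ∧ ∀ p ∈ g2, (p.2.map Prod.fst).Nodup)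
instance (g1 : List (String × List (String × String × String))) (g2 : List (String × List (String × String × String))) (snplist : List String) : Decidable (Pre_merge_gwas_res g1 g2 snplist) := by unfold Pre_merge_gwas_res; infer_instance

def pvWitness_merge_gwas_res : (List (String × List (String × String × String))) × (List (String × List (String × String × String))) × List String :=
  ([("t1", [("s1", ("0.1", "0.2"))])], [("t2", [])], ["s1", "s2"])

def Spec_merge_gwas_res (g1 : List (String × List (String × String × String))) (g2 : List (String × List (String × String × String))) (snplist : List String) (out : List (String × List (String × String × String))) : Prop := out = merge_gwas_res_alt g1 g2 snplist
instance (g1 : List (String × List (String × String × String))) (g2 : List (String × List (String × String × String))) (snplist : List String) (out : List (String × List (String × String × String))) : Decidable (Spec_merge_gwas_res g1 g2 snplist out) := by unfold Spec_merge_gwas_res; infer_instance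

-- ===== CLAIM (what is proved, stated in full; the proofs are below) =====
def Claim_equal_merge_gwas_res : Prop := ∀ (g1 : List (String × List (String × String × String))) (g2 : List (String × List (String × String × String))) (snplist : List String), Dom_merge_gwas_res g1 g2 snplist → Pre_merge_gwas_res g1 g2 snplist → Spec_merge_gwas_res g1 g2 snplist (merge_gwas_res g1 g2 snplist)

-- ===== LEMMAS AND PROOFS =====

-- a dict whose items are (s, r s) over a key list ks
def pvMkMap {ν : Type} (ks : List String) (r : String → ν) : PySem.Dict String ν :=
  PySem.Dict.mk (ks.map fun s => (s, r s))

-- update a row with an optional scatter hit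
def pvUpd (o : Option (String × String)) (t : String) (row : PySem.Dict String (String × String)) : PySem.Dict String (String × String) :=
  match o with
  | some v => row.insert t v
  | none => row

theorem pvMkMap_keys {ν : Type} (ks : List String) (r : String → ν) : (pvMkMap ks r).keys = ks := by
  show List.map (fun x => x.1) (ks.map fun s => (s, r s)) = ks
  rw [List.map_map, show ((fun x : String × ν => x.1) ∘ fun s => (s, r s)) = id from rfl, List.map_id]

theorem pvMkMap_contains {ν : Type} (ks : List String) (r : String → ν) (s0 : String) :
    (pvMkMap ks r).contains s0 = decide (s0 ∈ ks) := by
  rw [PySem.Dict.contains_eq_decide_mem_keys, pvMkMap_keys]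

theorem pvMkMap_congr {ν : Type} (ks : List String) (r r' : String → ν)
    (h : ∀ s ∈ ks, r s = r' s) : pvMkMap ks r = pvMkMap ks r' := by
  apply PySem.Dict.ext
  exact List.map_congr_left fun s hs => by rw [h s hs]

theorem pvMkMap_insert_mem {ν : Type} {ks : List String} {s0 : String} (r : String → ν) (v : ν)
    (h : s0 ∈ ks) :
    (pvMkMap ks r).insert s0 v = pvMkMap ks (fun s => if s = s0 then v else r s) := by
  apply PySem.Dict.ext
  rw [PySem.Dict.items_insert_of_contains _ _ (by rw [pvMkMap_contains]; simpa)]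
  show (List.map _ (ks.map fun s => (s, r s))) = _
  rw [List.map_map]
  apply List.map_congr_left
  intro s _
  by_cases hss : s = s0 <;> simp [hss]

theorem pvMkMap_insert_fresh {ν : Type} {ks : List String} {s0 : String} (r : String → ν) (v : ν)
    (h : s0 ∉ ks) :
    (pvMkMap ks r).insert s0 v = pvMkMap (ks ++ [s0]) (fun s => if s = s0 then v else r s) := by
  apply PySem.Dict.ext
  rw [PySem.Dict.items_insert_of_not_contains _ _ (by rw [pvMkMap_contains]; simpa)]
  show (ks.map fun s => (s, r s)) ++ [(s0, v)]
      = (ks ++ [s0]).map fun s => (s, if s = s0 then v else r s)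
  rw [List.map_append]
  congr 1
  · exact (List.map_congr_left fun s hs => by
      have : s ≠ s0 := fun he => h (he ▸ hs)
      simp [this]).symm
  · simp

theorem pvMkMap_getD {ν : Type} {ks : List String} {s0 : String} (r : String → ν) (d0 : ν)
    (hnd : ks.Nodup) (h : s0 ∈ ks) : (pvMkMap ks r).getD s0 d0 = r s0 := by
  apply PySem.Dict.getD_of_mem_items
  · exact List.mem_map_of_mem h
  · rw [pvMkMap_keys]; exact hnd

theorem pvMkMap_modify {ν : Type} {ks : List String} {s0 : String} (r : String → ν) (dflt : ν)
    (f : ν → ν) (hnd : ks.Nodup) (h : s0 ∈ ks) :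
    (pvMkMap ks r).modify s0 dflt f = pvMkMap ks (fun s => if s = s0 then f (r s) else r s) := by
  show (pvMkMap ks r).insert s0 (f ((pvMkMap ks r).getD s0 dflt)) = _
  rw [pvMkMap_getD r dflt hnd h, pvMkMap_insert_mem r _ h]
  exact pvMkMap_congr _ _ _ fun s _ => by by_cases hss : s = s0 <;> simp [hss]

-- one inner `for snp in snplist` pass of A, over a dict in pvMkMap form
theorem pv_pass (l ks : List String) (hnd : ks.Nodup) (hsub : ∀ s ∈ l, s ∈ ks) (t : String)
    (v : String → String × String) (r : String → PySem.Dict String (String × String)) :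
    l.foldl (fun c s => c.modify s PySem.Dict.empty (fun row => row.insert t (v s))) (pvMkMap ks r)
      = pvMkMap ks (fun s => if s ∈ l then (r s).insert t (v s) else r s) := by
  induction l generalizing r with
  | nil =>
    simp only [List.foldl_nil]
    exact pvMkMap_congr _ _ _ fun s _ => by simp
  | cons s0 rest ih =>
    simp only [List.foldl_cons]
    rw [pvMkMap_modify r _ _ hnd (hsub s0 (by simp)),
      ih (fun s hs => hsub s (List.mem_cons_of_mem _ hs))]
    apply pvMkMap_congr
    intro s _
    by_cases h1 : s = s0
    · subst h1
      by_cases h2 : s ∈ rest <;>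
        simp [h2, List.mem_cons, PySem.Dict.insert_insert_self]
    · by_cases h2 : s ∈ rest <;> simp [h1, h2, List.mem_cons]

-- one whole trait-major phase of A
theorem pv_phase (gl : List (String × List (String × String × String))) (snplist ks : List String)
    (hnd : ks.Nodup) (hmem : ∀ s, s ∈ snplist ↔ s ∈ ks)
    (w : String × List (String × String × String) → String → String × String)
    (r : String → PySem.Dict String (String × String)) :
    gl.foldl (fun comb p =>
        snplist.foldl (fun c s => c.modify s PySem.Dict.empty (fun row => row.insert p.1 (w p s))) comb)
        (pvMkMap ks r)
      = pvMkMap ks (fun s => gl.foldl (fun row p => row.insert p.1 (w p s)) (r s)) := by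
  induction gl generalizing r with
  | nil => simp only [List.foldl_nil]
  | cons p gl' ih =>
    simp only [List.foldl_cons]
    rw [pv_pass snplist ks hnd (fun s hs => (hmem s).1 hs) p.1 (fun s => w p s) r,
      pvMkMap_congr _ _ (fun s => (r s).insert p.1 (w p s))
        (fun s hs => by simp [(hmem s).2 hs]),
      ih]

theorem pv_foldl_insert_fun {ν : Type} (l : List String) (w : String → ν) :
    ∀ ks : List String, ks.Nodup →
      l.foldl (fun d s => d.insert s (w s)) (pvMkMap ks w) = pvMkMap (PySem.Set.update ks l) w := by
  induction l with
  | nil => intro ks _; rfl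
  | cons s0 rest ih =>
    intro ks hnd
    simp only [List.foldl_cons]
    have hupd : PySem.Set.update ks (s0 :: rest) = PySem.Set.update (PySem.Set.add ks s0) rest := rfl
    by_cases h : s0 ∈ ks
    · rw [pvMkMap_insert_mem w (w s0) h,
        pvMkMap_congr _ _ w (fun s _ => by by_cases hss : s = s0 <;> simp [hss])]
      have hadd : PySem.Set.add ks s0 = ks := by
        simp [PySem.Set.add, PySem.Set.contains, h]
      rw [hupd, hadd]
      exact ih ks hnd
    · rw [pvMkMap_insert_fresh w (w s0) h,
        pvMkMap_congr _ _ w (fun s _ => by by_cases hss : s = s0 <;> simp [hss])]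
      have hadd : PySem.Set.add ks s0 = ks ++ [s0] := by
        simp [PySem.Set.add, PySem.Set.contains, h]
      rw [hupd, hadd]
      exact ih (ks ++ [s0])
        (List.Nodup.append hnd (List.nodup_singleton _) (by simpa [List.disjoint_singleton] using h))

theorem pv_foldl_insert_fun' {ν : Type} (l : List String) (w : String → ν) :
    l.foldl (fun d s => d.insert s (w s)) PySem.Dict.empty = pvMkMap (PySem.Set.ofList l) w :=
  pv_foldl_insert_fun l w [] List.nodup_nil

-- a fold inserting distinct keys l with values w on top of a pvMkMap over ks
theorem pv_insert_phase {ν : Type} (l : List String) (w : String → ν) (hl : l.Nodup) :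
    ∀ (ks : List String) (r : String → ν),
      l.foldl (fun d t => d.insert t (w t)) (pvMkMap ks r)
        = pvMkMap (PySem.Set.update ks l) (fun t => if t ∈ l then w t else r t) := by
  induction l with
  | nil =>
    intro ks r
    exact (pvMkMap_congr _ _ _ fun s _ => by simp).symm
  | cons t0 rest ih =>
    intro ks r
    obtain ⟨hni, hrest⟩ := List.nodup_cons.1 hl
    simp only [List.foldl_cons]
    have hupd : PySem.Set.update ks (t0 :: rest) = PySem.Set.update (PySem.Set.add ks t0) rest := rfl
    by_cases h : t0 ∈ ks
    · have hadd : PySem.Set.add ks t0 = ks := by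
        simp [PySem.Set.add, PySem.Set.contains, h]
      rw [pvMkMap_insert_mem r (w t0) h, ih hrest ks _, hupd, hadd]
      apply pvMkMap_congr
      intro t _
      by_cases h1 : t ∈ rest
      · simp [h1, List.mem_cons]
      · by_cases h2 : t = t0 <;> simp [h1, h2, List.mem_cons]
    · have hadd : PySem.Set.add ks t0 = ks ++ [t0] := by
        simp [PySem.Set.add, PySem.Set.contains, h]
      rw [pvMkMap_insert_fresh r (w t0) h, ih hrest (ks ++ [t0]) _, hupd, hadd]
      apply pvMkMap_congr
      intro t _
      by_cases h1 : t ∈ rest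
      · simp [h1, List.mem_cons]
      · by_cases h2 : t = t0 <;> simp [h1, h2, List.mem_cons, hni]

-- PySem.Set.update ks l appends the new keys of l in order
theorem pv_set_update_filter (l : List String) (hl : l.Nodup) :
    ∀ ks : List String, PySem.Set.update ks l = ks ++ l.filter (fun t => !(decide (t ∈ ks))) := by
  induction l with
  | nil => intro ks; simp [PySem.Set.update]
  | cons a rest ih =>
    intro ks
    obtain ⟨hni, hrest⟩ := List.nodup_cons.1 hl
    have hupd : PySem.Set.update ks (a :: rest) = PySem.Set.update (PySem.Set.add ks a) rest := rfl
    by_cases h : a ∈ ks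
    · have hadd : PySem.Set.add ks a = ks := by
        simp [PySem.Set.add, PySem.Set.contains, h]
      rw [hupd, hadd, ih hrest ks]
      simp [h]
    · have hadd : PySem.Set.add ks a = ks ++ [a] := by
        simp [PySem.Set.add, PySem.Set.contains, h]
      rw [hupd, hadd, ih hrest (ks ++ [a])]
      have hfil : rest.filter (fun t => !(decide (t ∈ ks ++ [a])))
          = rest.filter (fun t => !(decide (t ∈ ks))) := by
        apply List.filter_congr
        intro t ht
        have : t ≠ a := fun he => hni (he ▸ ht)
        simp [List.mem_append, this]
      rw [hfil]
      simp [h, List.append_assoc]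

-- one scatter pass of B (one trait's association entries) over a pvMkMap row table
theorem pv_scatter_one (a : List (String × String × String)) (ks : List String) (t : String)
    (hnd : ks.Nodup) (ha : (a.map Prod.fst).Nodup) :
    ∀ r : String → PySem.Dict String (String × String),
      a.foldl (fun rows p =>
          if rows.contains p.1 then
            rows.modify p.1 PySem.Dict.empty (fun row => row.insert t p.2)
          else rows) (pvMkMap ks r)
        = pvMkMap ks (fun s => pvUpd ((PySem.Dict.mk a).get? s) t (r s)) := by
  induction a with
  | nil =>
    intro r
    exact (pvMkMap_congr _ _ _ fun s _ => by simp [pvUpd, PySem.Dict.get?]).symm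
  | cons p rest ih =>
    intro r
    obtain ⟨hni, hrest⟩ := List.nodup_cons.1 ha
    simp only [List.foldl_cons]
    rw [pvMkMap_contains]
    by_cases h : p.1 ∈ ks
    · rw [if_pos (by simpa), pvMkMap_modify r _ _ hnd h, ih hrest _]
      apply pvMkMap_congr
      intro s _
      by_cases h1 : s = p.1
      · subst h1
        have hnone : (PySem.Dict.mk rest).get? p.1 = none := by
          rw [PySem.Dict.get?_eq_none_iff_not_mem_keys]
          simpa using hni
        rw [PySem.Dict.get?_mk_cons]
        simp [hnone, pvUpd]
      · rw [PySem.Dict.get?_mk_cons]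
        have : (p.1 == s) = false := by simpa using fun he => h1 (he.symm)
        simp only [this, Bool.false_eq_true, if_false]
        rw [if_neg h1]
    · rw [if_neg (by simpa)]
      rw [ih hrest r]
      apply pvMkMap_congr
      intro s hs
      have h1 : s ≠ p.1 := fun he => h (he ▸ hs)
      rw [PySem.Dict.get?_mk_cons]
      have : (p.1 == s) = false := by simpa using fun he => h1 (he.symm)
      simp only [this, Bool.false_eq_true, if_false]

-- the whole scatter loop of B
theorem pv_scatter_all (ts : List String) (src : String → List (String × String × String))
    (ks : List String) (hnd : ks.Nodup) (hsrc : ∀ t ∈ ts, ((src t).map Prod.fst).Nodup) :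
    ∀ r : String → PySem.Dict String (String × String),
      ts.foldl (fun rows t =>
          (src t).foldl (fun rows p =>
            if rows.contains p.1 then
              rows.modify p.1 PySem.Dict.empty (fun row => row.insert t p.2)
            else rows) rows) (pvMkMap ks r)
        = pvMkMap ks (fun s =>
            ts.foldl (fun row t => pvUpd ((PySem.Dict.mk (src t)).get? s) t row) (r s)) := by
  induction ts with
  | nil => intro r; simp only [List.foldl_nil]
  | cons t0 rest ih =>
    intro r
    simp only [List.foldl_cons]
    rw [pv_scatter_one (src t0) ks t0 hnd (hsrc t0 (by simp)) r,
      ih (fun t ht => hsrc t (List.mem_cons_of_mem _ ht))]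

-- per-SNP row: the conditional updates over the trait list, on a pre-filled row
theorem pv_row_upd (m : String → Option (String × String)) (l : List String) :
    ∀ (ks : List String) (r : String → String × String), (∀ t ∈ l, t ∈ ks) →
      l.foldl (fun row t => pvUpd (m t) t row) (pvMkMap ks r)
        = pvMkMap ks (fun t => if t ∈ l then (m t).getD (r t) else r t) := by
  induction l with
  | nil =>
    intro ks r _
    exact (pvMkMap_congr _ _ _ fun s _ => by simp).symm
  | cons t0 rest ih =>
    intro ks r hsub
    simp only [List.foldl_cons]
    have hstep : pvUpd (m t0) t0 (pvMkMap ks r)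
        = pvMkMap ks (fun t => if t = t0 then (m t0).getD (r t0) else r t) := by
      cases hm : m t0 with
      | none =>
        simp only [pvUpd]
        exact pvMkMap_congr _ _ _ fun t _ => by by_cases h : t = t0 <;> simp [h]
      | some v =>
        simp only [pvUpd]
        rw [pvMkMap_insert_mem r v (hsub t0 (by simp))]
        exact pvMkMap_congr _ _ _ fun t _ => by by_cases h : t = t0 <;> simp [h]
    rw [hstep, ih ks _ (fun t ht => hsub t (List.mem_cons_of_mem _ ht))]
    apply pvMkMap_congr
    intro t _
    by_cases h1 : t ∈ rest
    · rw [if_pos h1, if_pos (List.mem_cons.2 (Or.inr h1))]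
      by_cases h2 : t = t0
      · subst h2; cases m t <;> simp
      · simp [h2]
    · by_cases h2 : t = t0
      · subst h2
        simp [h1]
      · simp [h1, h2, List.mem_cons]

-- a fold over pairs whose inserted value depends only on the key is a fold over the keys
theorem pv_fold_pairs {ν : Type} (l : List (String × List (String × String × String)))
    (F : String → ν) (init : PySem.Dict String ν) :
    l.foldl (fun row p => row.insert p.1 (F p.1)) init
      = (l.map Prod.fst).foldl (fun row t => row.insert t (F t)) init := by
  induction l generalizing init with
  | nil => rfl
  | cons p rest ih => simp only [List.foldl_cons, List.map_cons]; exact ih _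

-- ===== VERDICT (by name: the statement is the Claim_ definition above) =====
theorem merge_gwas_res_spec : Claim_equal_merge_gwas_res := by
  intro g1 g2 snplist _ hpre
  obtain ⟨⟨h1, h1i⟩, h2, h2i⟩ := hpre
  unfold Spec_merge_gwas_res
  simp only [merge_gwas_res, merge_gwas_res_alt]
  have hknd : (PySem.Set.ofList snplist).Nodup := PySem.Set.nodup_ofList snplist
  have hkmem : ∀ s, s ∈ snplist ↔ s ∈ PySem.Set.ofList snplist :=
    fun s => (PySem.Set.mem_ofList snplist s).symm
  have hkeys1 : (PySem.Dict.mk g1).keys = g1.map Prod.fst := rfl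
  have hkeys2 : (PySem.Dict.mk g2).keys = g2.map Prod.fst := rfl
  -- membership in a key list gives the stored association list
  have hlook : ∀ (g : List (String × List (String × String × String))), (g.map Prod.fst).Nodup →
      ∀ t ∈ g.map Prod.fst, ∃ p ∈ g, p.1 = t ∧ (PySem.Dict.mk g).getD t [] = p.2 := by
    intro g hg t ht
    obtain ⟨p, hp, hpt⟩ := List.mem_map.1 ht
    refine ⟨p, hp, hpt, ?_⟩
    subst hpt
    exact PySem.Dict.getD_of_mem_items _ (by simpa using hp) (by simpa [PySem.Dict.keys] using hg) []
  -- the trait column list and its properties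
  have hcont1 : ∀ t, (PySem.Dict.mk g1).contains t = decide (t ∈ g1.map Prod.fst) := by
    intro t; rw [PySem.Dict.contains_eq_decide_mem_keys, hkeys1]
  have hcont2 : ∀ t, (PySem.Dict.mk g2).contains t = decide (t ∈ g2.map Prod.fst) := by
    intro t; rw [PySem.Dict.contains_eq_decide_mem_keys, hkeys2]
  have htr : ((PySem.Dict.mk g1).keys ++
      ((PySem.Dict.mk g2).keys.filter (fun t => !((PySem.Dict.mk g1).contains t)))).Nodup := by
    rw [hkeys1, hkeys2]
    refine List.Nodup.append h1 (h2.filter _) ?_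
    intro t ht1 ht2
    have := List.of_mem_filter ht2
    rw [hcont1] at this
    simp [ht1] at this
  have hmemtr : ∀ t, t ∈ (PySem.Dict.mk g1).keys ++
        ((PySem.Dict.mk g2).keys.filter (fun t => !((PySem.Dict.mk g1).contains t))) →
      t ∉ g2.map Prod.fst → t ∈ g1.map Prod.fst := by
    intro t ht hn2
    rcases List.mem_append.1 ht with h | h
    · rwa [hkeys1] at h
    · have hm2 := List.mem_of_mem_filter h
      rw [hkeys2] at hm2
      exact absurd hm2 hn2
  have hsrc : ∀ t ∈ (PySem.Dict.mk g1).keys ++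
        ((PySem.Dict.mk g2).keys.filter (fun t => !((PySem.Dict.mk g1).contains t))),
      (((if (PySem.Dict.mk g2).contains t then (PySem.Dict.mk g2).getD t []
        else (PySem.Dict.mk g1).getD t [])).map Prod.fst).Nodup := by
    intro t ht
    by_cases hc : (PySem.Dict.mk g2).contains t = true
    · rw [if_pos hc]
      have htm : t ∈ g2.map Prod.fst := by rw [hcont2] at hc; simpa using hc
      obtain ⟨p, hp, _, he⟩ := hlook g2 h2 t htm
      rw [he]; exact h2i p hp
    · rw [if_neg hc]
      have htm : t ∈ g1.map Prod.fst := by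
        refine hmemtr t ht ?_
        rw [hcont2] at hc; simpa using hc
      obtain ⟨p, hp, _, he⟩ := hlook g1 h1 t htm
      rw [he]; exact h1i p hp
  -- reduce both sides to pvMkMap over the snp set
  refine congrArg (List.map _) (congrArg PySem.Dict.items ?_)
  -- A side
  rw [pv_foldl_insert_fun' snplist (fun _ => PySem.Dict.empty),
    pv_phase g1 snplist _ hknd hkmem
      (fun p s => (PySem.Dict.mk ((PySem.Dict.mk g1).getD p.1 [])).getD s ("NA", "NA")) _,
    pv_phase g2 snplist _ hknd hkmem
      (fun p s => (PySem.Dict.mk ((PySem.Dict.mk g2).getD p.1 [])).getD s ("NA", "NA")) _]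
  -- B side: pre-fill, then the scatter loop
  rw [pv_foldl_insert_fun' snplist (fun _ =>
    ((PySem.Dict.mk g1).keys ++
      ((PySem.Dict.mk g2).keys.filter (fun t => !((PySem.Dict.mk g1).contains t)))).foldl
      (fun r t => r.insert t ("NA", "NA")) PySem.Dict.empty)]
  refine Eq.trans ?_
    (pv_scatter_all
      ((PySem.Dict.mk g1).keys ++
        ((PySem.Dict.mk g2).keys.filter (fun t => !((PySem.Dict.mk g1).contains t))))
      (fun t => if (PySem.Dict.mk g2).contains t then (PySem.Dict.mk g2).getD t []
        else (PySem.Dict.mk g1).getD t [])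
      (PySem.Set.ofList snplist) hknd hsrc _).symm
  apply pvMkMap_congr
  intro s _
  -- per-SNP row equality
  have hna : ((PySem.Dict.mk g1).keys ++
        ((PySem.Dict.mk g2).keys.filter (fun t => !((PySem.Dict.mk g1).contains t)))).foldl
        (fun r t => r.insert t (("NA", "NA") : String × String)) PySem.Dict.empty
      = pvMkMap ((PySem.Dict.mk g1).keys ++
          ((PySem.Dict.mk g2).keys.filter (fun t => !((PySem.Dict.mk g1).contains t))))
          (fun _ => ("NA", "NA")) := by
    rw [pv_foldl_insert_fun' _ (fun _ => ("NA", "NA"))]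
    congr 1
    exact PySem.Set.ofList_eq_self_of_nodup _ htr
  rw [hna, pv_row_upd _ _ _ _ (fun t ht => ht)]
  -- A row: convert the two pair-folds to key-folds and stage them
  rw [show (PySem.Dict.empty : PySem.Dict String (String × String))
      = pvMkMap [] (fun _ => ("NA", "NA")) from rfl]
  rw [show List.foldl (fun (row : PySem.Dict String (String × String)) p =>
        row.insert p.1 ((PySem.Dict.mk ((PySem.Dict.mk g1).getD p.1 [])).getD s ("NA", "NA")))
        (pvMkMap [] (fun _ => ("NA", "NA"))) g1
      = List.foldl (fun row t =>
        row.insert t ((PySem.Dict.mk ((PySem.Dict.mk g1).getD t [])).getD s ("NA", "NA")))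
        (pvMkMap [] (fun _ => ("NA", "NA"))) (g1.map Prod.fst) from
      pv_fold_pairs g1 (fun t => (PySem.Dict.mk ((PySem.Dict.mk g1).getD t [])).getD s ("NA", "NA")) _]
  rw [pv_insert_phase (g1.map Prod.fst) _ h1 [] _]
  rw [show List.foldl (fun (row : PySem.Dict String (String × String)) p =>
        row.insert p.1 ((PySem.Dict.mk ((PySem.Dict.mk g2).getD p.1 [])).getD s ("NA", "NA")))
        (pvMkMap (PySem.Set.update [] (g1.map Prod.fst)) _) g2
      = List.foldl (fun row t =>
        row.insert t ((PySem.Dict.mk ((PySem.Dict.mk g2).getD t [])).getD s ("NA", "NA")))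
        (pvMkMap (PySem.Set.update [] (g1.map Prod.fst)) _) (g2.map Prod.fst) from
      pv_fold_pairs g2 (fun t => (PySem.Dict.mk ((PySem.Dict.mk g2).getD t [])).getD s ("NA", "NA")) _]
  rw [pv_insert_phase (g2.map Prod.fst) _ h2 _ _]
  have hupd0 : PySem.Set.update ([] : List String) (g1.map Prod.fst) = g1.map Prod.fst :=
    PySem.Set.ofList_eq_self_of_nodup _ h1
  rw [hupd0, pv_set_update_filter (g2.map Prod.fst) h2 (g1.map Prod.fst)]
  have hfil : (g2.map Prod.fst).filter (fun t => !(decide (t ∈ g1.map Prod.fst)))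
      = (PySem.Dict.mk g2).keys.filter (fun t => !((PySem.Dict.mk g1).contains t)) := by
    rw [hkeys2]
    exact List.filter_congr fun t _ => by rw [hcont1]
  rw [hfil]
  apply pvMkMap_congr
  intro t ht
  have ht' : t ∈ (PySem.Dict.mk g1).keys ++
      ((PySem.Dict.mk g2).keys.filter (fun t => !((PySem.Dict.mk g1).contains t))) := ht
  rw [if_pos ht', ← PySem.Dict.getD_eq_get?_getD]
  by_cases hc : (PySem.Dict.mk g2).contains t = true
  · have htm : t ∈ g2.map Prod.fst := by rw [hcont2] at hc; simpa using hc
    rw [if_pos htm, if_pos hc]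
  · have htm2 : t ∉ g2.map Prod.fst := by rw [hcont2] at hc; simpa using hc
    have htm1 : t ∈ g1.map Prod.fst := hmemtr t ht' htm2
    rw [if_neg htm2, if_neg hc, if_pos htm1]
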